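-- pv_equiv track=rewrite | github.com/chitturics/obs-ai | skills/performance_optimizer/skill.py | _split_pipeline
-- ===== SOURCE A (Python) =====
-- from typing import Any, Dict, List, Optional
--
-- def _split_pipeline(query: str) -> List[str]:
--     """Split SPL pipeline into stages, respecting subsearch brackets."""
--     depth = 0
--     parts = []
--     current = []
--     for char in query:
--         if char == "[":
--             depth += 1
--         elif char == "]":
--             depth -= 1
--         elif char == "|" and depth == 0:
--             parts.append("".join(current).strip())
--             current = []
--             continue
--         current.append(char)
--     parts.append("".join(current).strip())
--     return [p for p in parts if p]
-- ===== SOURCE B (Python) =====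
-- from typing import List
--
-- def _split_pipeline(query: str) -> List[str]:
--     """Split SPL pipeline by repeatedly cutting at the first top-level '|'."""
--     def find_cut(s: str) -> int:
--         depth = 0
--         for i, ch in enumerate(s):
--             if ch == "[":
--                 depth += 1
--             elif ch == "]":
--                 depth -= 1
--             elif ch == "|" and depth == 0:
--                 return i
--         return -1
--
--     parts = []
--     rest = query
--     while True:
--         i = find_cut(rest)
--         if i == -1:
--             break
--         parts.append(rest[:i].strip())
--         rest = rest[i + 1:]
--     parts.append(rest.strip())
--     return [p for p in parts if p]
-- ===== Notes on version B (the rewrite author's own statement) =====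
-- stated objective: alternative
-- what changed: Replaced the single fold with a depth/parts/current accumulator by a cut-and-recurse decomposition: a helper scans for the first top-level pipe separator and the segment before it is sliced off, repeated on the remainder.
import Mathlib
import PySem

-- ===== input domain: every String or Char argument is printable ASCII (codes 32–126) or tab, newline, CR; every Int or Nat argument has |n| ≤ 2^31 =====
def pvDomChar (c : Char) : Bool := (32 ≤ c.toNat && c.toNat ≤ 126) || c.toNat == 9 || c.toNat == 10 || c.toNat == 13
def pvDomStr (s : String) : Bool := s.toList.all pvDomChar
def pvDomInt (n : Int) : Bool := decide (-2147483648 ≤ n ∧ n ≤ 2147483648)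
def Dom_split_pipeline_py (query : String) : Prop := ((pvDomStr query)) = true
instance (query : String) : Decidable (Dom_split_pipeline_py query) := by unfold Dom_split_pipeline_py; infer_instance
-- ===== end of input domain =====

-- B replaces A's one-pass accumulator fold by a cut-at-first-top-level-'|' loop over segments (alternative decomposition, same cost).

-- ===== PORT A =====
-- one step of A's for-loop: state (depth, parts, current)
def stepA (st : Int × List String × List Char) (c : Char) : Int × List String × List Char :=
  if c = '[' then (st.1 + 1, st.2.1, st.2.2 ++ [c])
  else if c = ']' then (st.1 - 1, st.2.1, st.2.2 ++ [c])
  else if c = '|' ∧ st.1 = 0 then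
    (st.1, st.2.1 ++ [String.ofList (PySem.Chars.strip st.2.2)], [])
  else (st.1, st.2.1, st.2.2 ++ [c])

def split_pipeline_py (query : String) : List String :=
  let fin := query.toList.foldl stepA (0, [], [])
  (fin.2.1 ++ [String.ofList (PySem.Chars.strip fin.2.2)]).filter (fun p => p != "")

-- ===== PORT B =====
-- B's find_cut helper: index of the first '|' at bracket depth 0 (none = Python's -1); exact port of its loop
def findCutAux (d : Int) : List Char → Option Nat
  | [] => none
  | c :: s =>
    if c = '[' then (findCutAux (d + 1) s).map (· + 1)
    else if c = ']' then (findCutAux (d - 1) s).map (· + 1)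
    else if c = '|' ∧ d = 0 then some 0
    else (findCutAux d s).map (· + 1)

-- termination fact for the cut loop (cited by splitB's decreasing_by)
theorem findCutAux_lt_length (d : Int) (s : List Char) (i : Nat)
    (h : findCutAux d s = some i) : i < s.length := by
  induction s generalizing d i with
  | nil => simp [findCutAux] at h
  | cons c t ih =>
    simp only [findCutAux] at h
    split_ifs at h with h1 h2 h3
    · obtain ⟨j, hj, rfl⟩ := Option.map_eq_some_iff.mp h
      have := ih _ _ hj; simp; omega
    · obtain ⟨j, hj, rfl⟩ := Option.map_eq_some_iff.mp h
      have := ih _ _ hj; simp; omega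
    · injection h with h; simp; omega
    · obtain ⟨j, hj, rfl⟩ := Option.map_eq_some_iff.mp h
      have := ih _ _ hj; simp; omega

-- B's while-loop: slice off the segment before the first top-level '|', repeat on the remainder
-- (s[:i] / s[i+1:] ported as take/drop: i is a valid nonnegative index by findCutAux_lt_length)
def splitB (s : List Char) : List String :=
  match h : findCutAux 0 s with
  | none => [String.ofList (PySem.Chars.strip s)]
  | some i => String.ofList (PySem.Chars.strip (s.take i)) :: splitB (s.drop (i + 1))
termination_by s.length
decreasing_by
  have := findCutAux_lt_length 0 s i h
  simp; omega

def split_pipeline_py_alt (query : String) : List String :=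
  (splitB query.toList).filter (fun p => p != "")

-- ===== PRECONDITION & SPEC =====
def Spec_split_pipeline_py (query : String) (out : List String) : Prop := out = split_pipeline_py_alt query
instance (query : String) (out : List String) : Decidable (Spec_split_pipeline_py query out) := by unfold Spec_split_pipeline_py; infer_instance

-- ===== CLAIM (what is proved, stated in full; the proofs are below) =====
def Claim_equal_split_pipeline_py : Prop := ∀ (query : String), Dom_split_pipeline_py query → Spec_split_pipeline_py query (split_pipeline_py query)

-- ===== LEMMAS AND PROOFS =====

-- bracket depth contributed by a chunk of characters
def bdepth (cs : List Char) : Int := (cs.count '[' : Int) - (cs.count ']' : Int)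

theorem bdepth_nil : bdepth [] = 0 := by simp [bdepth]

theorem bdepth_cons (c : Char) (cs : List Char) :
    bdepth (c :: cs) = (if c = '[' then 1 else if c = ']' then -1 else 0) + bdepth cs := by
  simp only [bdepth, List.count_cons]
  split_ifs with h1 h2 <;> simp_all <;> ring

theorem findCutAux_append (xs : List Char) (d : Int) (ys : List Char) :
    findCutAux d (xs ++ ys) =
      match findCutAux d xs with
      | some i => some i
      | none => (findCutAux (d + bdepth xs) ys).map (· + xs.length) := by
  induction xs generalizing d with
  | nil =>
    simp only [List.nil_append, findCutAux, bdepth_nil, add_zero, List.length_nil]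
    cases findCutAux d ys <;> simp
  | cons c t ih =>
    simp only [List.cons_append, findCutAux, bdepth_cons]
    split_ifs with h1 h2 h3
    · rw [ih]
      cases ht : findCutAux (d + 1) t with
      | some i => simp
      | none =>
        have harg : d + (1 + bdepth t) = d + 1 + bdepth t := by ring
        rw [harg]
        cases findCutAux (d + 1 + bdepth t) ys with
        | none => simp
        | some v => simp; omega
    · rw [ih]
      cases ht : findCutAux (d - 1) t with
      | some i => simp
      | none =>
        have harg : d + (-1 + bdepth t) = d - 1 + bdepth t := by ring
        rw [harg]
        cases findCutAux (d - 1 + bdepth t) ys with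
        | none => simp
        | some v => simp; omega
    · simp
    · rw [ih]
      cases ht : findCutAux d t with
      | some i => simp
      | none =>
        have harg : d + (0 + bdepth t) = d + bdepth t := by ring
        rw [harg]
        cases findCutAux (d + bdepth t) ys with
        | none => simp
        | some v => simp; omega

-- a single non-cut character yields no cut
theorem findCutAux_single (d : Int) (c : Char) (h : ¬ (c = '|' ∧ d = 0)) :
    findCutAux d [c] = none := by
  simp only [findCutAux]
  split_ifs <;> simp_all

-- unfolding equation for splitB without the dependent-match binder
theorem splitB_eq (s : List Char) :
    splitB s = match findCutAux 0 s with
      | none => [String.ofList (PySem.Chars.strip s)]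
      | some i => String.ofList (PySem.Chars.strip (s.take i)) :: splitB (s.drop (i + 1)) := by
  rw [splitB]
  split <;> rename_i h <;> rw [h]

-- MAIN INVARIANT: running A's loop from a state whose current chunk `cur` contains no
-- top-level cut and whose depth is bdepth cur produces exactly B's segments of cur ++ s.
theorem loop_eq_splitB (s : List Char) :
    ∀ (parts : List String) (cur : List Char), findCutAux 0 cur = none →
      ((List.foldl stepA (bdepth cur, parts, cur) s).2.1
        ++ [String.ofList (PySem.Chars.strip (List.foldl stepA (bdepth cur, parts, cur) s).2.2)])
      = parts ++ splitB (cur ++ s) := by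
  induction s with
  | nil =>
    intro parts cur hcur
    simp [splitB_eq, hcur]
  | cons c t ih =>
    intro parts cur hcur
    by_cases h1 : c = '['
    · subst h1
      have hcur' : findCutAux 0 (cur ++ ['[']) = none := by
        rw [findCutAux_append, hcur]
        simp [findCutAux]
      have hbd : bdepth (cur ++ ['[']) = bdepth cur + 1 := by
        simp [bdepth, List.count_append]; ring
      have hthis := ih parts (cur ++ ['[']) hcur'
      rw [hbd] at hthis
      have hstep : stepA (bdepth cur, parts, cur) '[' = (bdepth cur + 1, parts, cur ++ ['[']) := by
        simp [stepA]
      rw [List.foldl_cons, hstep]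
      have hl : cur ++ ['['] ++ t = cur ++ '[' :: t := by simp
      rw [hl] at hthis
      exact hthis
    · by_cases h2 : c = ']'
      · subst h2
        have hcur' : findCutAux 0 (cur ++ [']']) = none := by
          rw [findCutAux_append, hcur]
          simp [findCutAux]
        have hbd : bdepth (cur ++ [']']) = bdepth cur - 1 := by
          simp [bdepth, List.count_append]; ring
        have hthis := ih parts (cur ++ [']']) hcur'
        rw [hbd] at hthis
        have hstep : stepA (bdepth cur, parts, cur) ']' = (bdepth cur - 1, parts, cur ++ [']']) := by
          simp [stepA]
        rw [List.foldl_cons, hstep]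
        have hl : cur ++ [']'] ++ t = cur ++ ']' :: t := by simp
        rw [hl] at hthis
        exact hthis
      · by_cases h3 : c = '|' ∧ bdepth cur = 0
        · obtain ⟨rfl, hd0⟩ := h3
          have hcut : findCutAux 0 (cur ++ '|' :: t) = some cur.length := by
            rw [findCutAux_append, hcur, hd0]
            simp [findCutAux]
          have ht1 : List.take cur.length (cur ++ '|' :: t) = cur :=
            List.take_left (l₁ := cur) (l₂ := '|' :: t)
          have ht2 : List.drop (cur.length + 1) (cur ++ '|' :: t) = t := by
            rw [show cur.length + 1 = (cur ++ ['|']).length by simp,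
              show cur ++ '|' :: t = (cur ++ ['|']) ++ t by simp, List.drop_left]
          have hsplit : splitB (cur ++ '|' :: t)
              = String.ofList (PySem.Chars.strip cur) :: splitB t := by
            rw [splitB_eq, hcut]
            simp only [ht1, ht2]
          have hthis := ih (parts ++ [String.ofList (PySem.Chars.strip cur)]) []
            (by simp [findCutAux])
          rw [bdepth_nil] at hthis
          have hstep : stepA (bdepth cur, parts, cur) '|'
              = (0, parts ++ [String.ofList (PySem.Chars.strip cur)], []) := by
            simp [stepA, hd0]
          rw [List.foldl_cons, hstep, hthis, hsplit]
          simp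
        · -- plain character (or '|' at nonzero depth): appended to current
          have hcur' : findCutAux 0 (cur ++ [c]) = none := by
            rw [findCutAux_append, hcur, findCutAux_single _ _ (by simpa using h3)]
            rfl
          have hbd : bdepth (cur ++ [c]) = bdepth cur := by
            simp [bdepth, List.count_append, h1, h2]
          have hthis := ih parts (cur ++ [c]) hcur'
          rw [hbd] at hthis
          have hstep : stepA (bdepth cur, parts, cur) c = (bdepth cur, parts, cur ++ [c]) := by
            simp only [stepA, if_neg h1, if_neg h2, if_neg h3]
          rw [List.foldl_cons, hstep]
          have hl : cur ++ [c] ++ t = cur ++ c :: t := by simp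
          rw [hl] at hthis
          exact hthis

-- ===== VERDICT (by name: the statement is the Claim_ definition above) =====
theorem split_pipeline_py_spec : Claim_equal_split_pipeline_py := by
  intro query _
  unfold Spec_split_pipeline_py
  have h := loop_eq_splitB query.toList [] [] (by simp [findCutAux])
  rw [bdepth_nil] at h
  simp only [List.nil_append] at h
  simp only [split_pipeline_py, split_pipeline_py_alt]
  rw [h]
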